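-- pv_equiv track=rewrite | github.com/posl/comment_recommendation | script/split_gen/5_time/zh/238_D/4.py | bit_sum
-- ===== SOURCE A (Python) =====
-- def bit_sum(a, s):
--     if a > s:
--         return False
--     if a == 0:
--         return s == 0
--     if s == 0:
--         return False
--     if a == s:
--         return True
--     if a & s != a:
--         return False
--     return bit_sum(a >> 1, s >> 1)
-- ===== SOURCE B (Python) =====
-- def bit_sum(a, s):
--     # Closed form instead of bit-by-bit recursion:
--     # for nonnegative ints: a is a submask of s and their bit_lengths agree;
--     # for two negatives: a is a (two's-complement) submask of s;
--     # mixed signs never succeed.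
--     if a >= 0 and s >= 0:
--         return (a & s) == a and a.bit_length() == s.bit_length()
--     if a < 0 and s < 0:
--         return (a & s) == a
--     return False
-- ===== Notes on version B (the rewrite author's own statement) =====
-- stated objective: simpler
-- what changed: Replaces the recursive bit-by-bit descent with a non-recursive closed form: submask test plus equal bit_length (nonnegative case), plain submask test (both negative), False for mixed signs.
import Mathlib
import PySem

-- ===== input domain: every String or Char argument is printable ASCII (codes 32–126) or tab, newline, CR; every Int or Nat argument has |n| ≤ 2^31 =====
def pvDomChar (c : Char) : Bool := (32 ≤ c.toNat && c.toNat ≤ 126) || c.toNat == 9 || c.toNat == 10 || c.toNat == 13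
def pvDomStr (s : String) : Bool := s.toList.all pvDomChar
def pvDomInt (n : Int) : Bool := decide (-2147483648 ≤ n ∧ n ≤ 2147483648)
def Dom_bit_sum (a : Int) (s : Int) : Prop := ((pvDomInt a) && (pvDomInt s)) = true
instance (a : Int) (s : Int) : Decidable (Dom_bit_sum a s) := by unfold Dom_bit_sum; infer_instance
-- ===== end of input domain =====

-- B replaces A's bit-by-bit recursion with a non-recursive closed form (submask + equal
-- bit_length for nonnegative inputs, plain submask for two negatives, False on mixed signs).

-- ===== PORT A =====
-- termination helper lemmas for the literal recursion (cited by decreasing_by)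
theorem pv_shr1_ofNat (m : Nat) : (Int.ofNat m) >>> (1 : Int) = Int.ofNat (m / 2) := by
  have h := Int.shiftRight_natCast m 1
  simpa [Nat.shiftRight_one] using h

theorem pv_shr1_negSucc (m : Nat) : (Int.negSucc m) >>> (1 : Int) = Int.negSucc (m / 2) := by
  have h := Int.shiftRight_negSucc m 1
  simpa [Nat.shiftRight_one] using h

theorem pv_shr1_natAbs_le (x : Int) : (x >>> (1 : Int)).natAbs ≤ x.natAbs := by
  cases x with
  | ofNat m => rw [pv_shr1_ofNat]; simp; omega
  | negSucc m => rw [pv_shr1_negSucc]; simp [Int.natAbs_negSucc]; omega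

theorem pv_shr1_natAbs_lt (x : Int) (h0 : x ≠ 0) (h1 : x ≠ -1) :
    (x >>> (1 : Int)).natAbs < x.natAbs := by
  cases x with
  | ofNat m =>
    rw [pv_shr1_ofNat]
    have hm : m ≠ 0 := by rintro rfl; exact h0 rfl
    simp; omega
  | negSucc m =>
    rw [pv_shr1_negSucc]
    have hm : m ≠ 0 := by rintro rfl; exact h1 rfl
    simp [Int.natAbs_negSucc]; omega

theorem pv_neg_one_land (s : Int) (hs : s ≠ -1) : Int.land (-1) s ≠ -1 := by
  cases s with
  | ofNat n =>
    show Int.ofNat (Nat.ldiff n 0) ≠ -1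
    have := Int.natCast_nonneg (Nat.ldiff n 0)
    simp only [Int.ofNat_eq_natCast]
    omega
  | negSucc n =>
    show Int.negSucc (0 ||| n) ≠ -1
    simp only [Nat.zero_or, Int.negSucc_eq]
    intro h
    apply hs
    simp only [Int.negSucc_eq]
    omega

-- literal transliteration of A
def bit_sum (a : Int) (s : Int) : Bool :=
  if h1 : a > s then false
  else if h2 : a = 0 then decide (s = 0)
  else if h3 : s = 0 then false
  else if h4 : a = s then true
  else if h5 : Int.land a s ≠ a then false
  else bit_sum (a >>> (1 : Int)) (s >>> (1 : Int))
termination_by a.natAbs + s.natAbs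
decreasing_by
  have ha1 : a ≠ -1 := by
    rintro rfl
    exact pv_neg_one_land s (fun h => h4 h.symm) (not_not.mp h5)
  have := pv_shr1_natAbs_lt a h2 ha1
  have := pv_shr1_natAbs_le s
  omega

-- ===== PORT B =====
-- Python's n.bit_length() (Python takes the bit length of |n|); B only reaches it for n ≥ 0
def nbl (n : Nat) : Nat := if n = 0 then 0 else n.log2 + 1

def pyBitLength (x : Int) : Int := Int.ofNat (nbl x.natAbs)

-- literal transliteration of B (Source B)
def bit_sum_alt (a : Int) (s : Int) : Bool :=
  if 0 ≤ a ∧ 0 ≤ s then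
    decide (Int.land a s = a) && decide (pyBitLength a = pyBitLength s)
  else if a < 0 ∧ s < 0 then
    decide (Int.land a s = a)
  else false

-- ===== PRECONDITION & SPEC =====
def Spec_bit_sum (a : Int) (s : Int) (out : Bool) : Prop := out = bit_sum_alt a s
instance (a : Int) (s : Int) (out : Bool) : Decidable (Spec_bit_sum a s out) := by unfold Spec_bit_sum; infer_instance

-- ===== CLAIM (what is proved, stated in full; the proofs are below) =====
def Claim_equal_bit_sum : Prop := ∀ (a : Int) (s : Int), Dom_bit_sum a s → Spec_bit_sum a s (bit_sum a s)

-- ===== LEMMAS AND PROOFS =====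

theorem pv_half_and (m n : Nat) (h : m &&& n = m) : m / 2 &&& n / 2 = m / 2 := by
  apply Nat.eq_of_testBit_eq
  intro i
  rw [Nat.testBit_and, Nat.testBit_div_two, Nat.testBit_div_two,
    ← Nat.testBit_and, h]

theorem pv_half_or (m n : Nat) (h : m ||| n = m) : m / 2 ||| n / 2 = m / 2 := by
  apply Nat.eq_of_testBit_eq
  intro i
  rw [Nat.testBit_or, Nat.testBit_div_two, Nat.testBit_div_two,
    ← Nat.testBit_or, h]

theorem pv_nbl_zero_iff (n : Nat) : nbl n = 0 ↔ n = 0 := by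
  unfold nbl; split_ifs with h <;> simp [h]

theorem pv_nbl_pos (m : Nat) (h : 1 ≤ m) : 1 ≤ nbl m := by
  unfold nbl; split_ifs with h' <;> omega

theorem pv_nbl_half (m : Nat) (h : 1 ≤ m) : nbl (m / 2) = nbl m - 1 := by
  rcases Nat.lt_or_ge m 2 with h2 | h2
  · interval_cases m
    decide
  · have hlog : Nat.log2 m = Nat.log2 (m / 2) + 1 := by
      rw [Nat.log2_def]; simp [h2]
    have hm2 : m / 2 ≠ 0 := by omega
    unfold nbl
    split_ifs with h0 h1 <;> omega

-- A on two nonnegative inputs: submask and equal bit length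
theorem pv_bit_sum_nonneg : ∀ (k m n : Nat), m + n ≤ k →
    bit_sum (Int.ofNat m) (Int.ofNat n) =
      (decide (m &&& n = m) && decide (nbl m = nbl n)) := by
  intro k
  induction k using Nat.strong_induction_on with
  | _ k ih =>
    intro m n hk
    rw [bit_sum]
    split_ifs with h1 h2 h3 h4 h5
    · -- m > n : submask would force m ≤ n
      have hmn : n < m := by simp only [Int.ofNat_eq_natCast] at h1; omega
      have : ¬ (m &&& n = m) := by
        intro h
        have : m ≤ n := h ▸ Nat.and_le_right
        omega
      simp [this]
    · -- a = 0
      have hm : m = 0 := by simp only [Int.ofNat_eq_natCast] at h2; omega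
      subst hm
      have h00 : nbl 0 = 0 := by simp [nbl]
      simp only [Nat.zero_and, decide_true, Bool.true_and, h00]
      rcases Nat.eq_zero_or_pos n with hn | hn
      · subst hn; simp [nbl]
      · have h0 : nbl n ≠ 0 := by
          intro h; rw [pv_nbl_zero_iff] at h; omega
        have hn1 : n ≠ 0 := by omega
        have hne : (0 : Nat) ≠ nbl n := Ne.symm h0
        simp [hn1, hne]
    · -- s = 0, a ≠ 0, a ≤ s : impossible
      exfalso
      simp only [Int.ofNat_eq_natCast] at h1 h2 h3
      omega
    · -- a = s
      have : m = n := Int.ofNat.inj h4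
      subst this
      simp [Nat.and_self]
    · -- not a submask
      have : m &&& n ≠ m := by
        intro h
        exact h5 (by show Int.ofNat (m &&& n) = Int.ofNat m; rw [h])
      simp [this]
    · -- recursive case
      have hand : m &&& n = m := by
        have h0 : Int.ofNat (m &&& n) = Int.ofNat m := not_not.mp h5
        exact Int.ofNat.inj h0
      have hm : m ≠ 0 := by
        intro h; exact h2 (by rw [h]; rfl)
      have hn : n ≠ 0 := by
        intro h; exact h3 (by rw [h]; rfl)
      have hklt : m / 2 + n / 2 < k := by omega
      rw [pv_shr1_ofNat, pv_shr1_ofNat,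
        ih (m / 2 + n / 2) hklt (m / 2) (n / 2) le_rfl]
      have he : (nbl (m / 2) = nbl (n / 2)) ↔ (nbl m = nbl n) := by
        rw [pv_nbl_half m (by omega), pv_nbl_half n (by omega)]
        have := pv_nbl_pos m (by omega)
        have := pv_nbl_pos n (by omega)
        omega
      simp [hand, pv_half_and m n hand, he]

-- A on two negative inputs: two's-complement submask
theorem pv_bit_sum_negneg : ∀ (m n : Nat),
    bit_sum (Int.negSucc m) (Int.negSucc n) = decide (m ||| n = m) := by
  intro m
  induction m using Nat.strong_induction_on with
  | _ m ih =>
    intro n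
    rw [bit_sum]
    by_cases h1 : Int.negSucc m > Int.negSucc n
    · -- a > s, i.e. m < n
      rw [dif_pos h1]
      have hmn : m < n := by
        simp only [Int.negSucc_eq] at h1; omega
      have : ¬ (m ||| n = m) := by
        intro h
        have : n ≤ m ||| n := Nat.right_le_or
        omega
      simp [this]
    · rw [dif_neg h1]
      have h2 : ¬ (Int.negSucc m = 0) := by
        simp only [Int.negSucc_eq]; omega
      have h3 : ¬ (Int.negSucc n = 0) := by
        simp only [Int.negSucc_eq]; omega
      rw [dif_neg h2, dif_neg h3]
      by_cases h4 : Int.negSucc m = Int.negSucc n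
      · rw [dif_pos h4]
        have : m = n := Int.negSucc.inj h4
        subst this
        simp
      · rw [dif_neg h4]
        by_cases h5 : Int.land (Int.negSucc m) (Int.negSucc n) ≠ Int.negSucc m
        · rw [dif_pos h5]
          have : m ||| n ≠ m := by
            intro h
            exact h5 (by show Int.negSucc (m ||| n) = Int.negSucc m; rw [h])
          simp [this]
        · rw [dif_neg h5]
          have hor : m ||| n = m := by
            have h0 : Int.negSucc (m ||| n) = Int.negSucc m := not_not.mp h5
            exact Int.negSucc.inj h0
          have hnm : n ≤ m := by
            have : n ≤ m ||| n := Nat.right_le_or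
            omega
          have hm1 : 1 ≤ m := by
            rcases Nat.eq_zero_or_pos m with h | h
            · exfalso
              apply h4
              subst h
              have hn0 : n = 0 := by
                have : n ≤ 0 ||| n := Nat.right_le_or
                omega
              rw [hn0]
            · exact h
          rw [pv_shr1_negSucc, pv_shr1_negSucc, ih (m / 2) (by omega) (n / 2)]
          simp [hor, pv_half_or m n hor]

-- A on mixed signs is false
theorem pv_bit_sum_mixed1 (m n : Nat) : bit_sum (Int.ofNat m) (Int.negSucc n) = false := by
  have h1 : (Int.ofNat m) > (Int.negSucc n) := by
    simp only [Int.ofNat_eq_natCast, Int.negSucc_eq]; omega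
  rw [bit_sum, dif_pos h1]

theorem pv_bit_sum_mixed2 (m n : Nat) : bit_sum (Int.negSucc m) (Int.ofNat n) = false := by
  rw [bit_sum]
  by_cases h1 : Int.negSucc m > Int.ofNat n
  · rw [dif_pos h1]
  · rw [dif_neg h1]
    have h2 : ¬ (Int.negSucc m = 0) := by
      simp only [Int.negSucc_eq]; omega
    rw [dif_neg h2]
    by_cases h3 : Int.ofNat n = 0
    · rw [dif_pos h3]
    · rw [dif_neg h3]
      have h4 : ¬ (Int.negSucc m = Int.ofNat n) := by
        simp only [Int.negSucc_eq, Int.ofNat_eq_natCast]; omega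
      rw [dif_neg h4]
      have h5 : Int.land (Int.negSucc m) (Int.ofNat n) ≠ Int.negSucc m := by
        intro h0
        have h0' : Int.ofNat (Nat.ldiff n m) = Int.negSucc m := h0
        have hge := Int.natCast_nonneg (Nat.ldiff n m)
        simp only [Int.ofNat_eq_natCast, Int.negSucc_eq] at h0'
        omega
      rw [dif_pos h5]

-- B unfolded on each sign pattern
theorem pv_alt_nonneg (m n : Nat) :
    bit_sum_alt (Int.ofNat m) (Int.ofNat n) =
      (decide (m &&& n = m) && decide (nbl m = nbl n)) := by
  unfold bit_sum_alt
  have hc : (0 : Int) ≤ Int.ofNat m ∧ (0 : Int) ≤ Int.ofNat n := by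
    constructor <;> simp only [Int.ofNat_eq_natCast] <;> omega
  rw [if_pos hc]
  have h1 : (Int.land (Int.ofNat m) (Int.ofNat n) = Int.ofNat m) ↔ (m &&& n = m) := by
    show (Int.ofNat (m &&& n) = Int.ofNat m) ↔ _
    simp only [Int.ofNat_eq_natCast]
    omega
  have h2 : (pyBitLength (Int.ofNat m) = pyBitLength (Int.ofNat n)) ↔ (nbl m = nbl n) := by
    unfold pyBitLength
    simp only [Int.ofNat_eq_natCast, Int.natAbs_natCast]
    omega
  simp only [h1, h2]

theorem pv_alt_negneg (m n : Nat) :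
    bit_sum_alt (Int.negSucc m) (Int.negSucc n) = decide (m ||| n = m) := by
  unfold bit_sum_alt
  have hc : ¬ ((0 : Int) ≤ Int.negSucc m ∧ (0 : Int) ≤ Int.negSucc n) := by
    simp only [Int.negSucc_eq]; omega
  have hc2 : (Int.negSucc m < 0 ∧ Int.negSucc n < 0) := by
    simp only [Int.negSucc_eq]; omega
  rw [if_neg hc, if_pos hc2]
  have h1 : (Int.land (Int.negSucc m) (Int.negSucc n) = Int.negSucc m) ↔ (m ||| n = m) := by
    show (Int.negSucc (m ||| n) = Int.negSucc m) ↔ _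
    constructor
    · exact fun h => Int.negSucc.inj h
    · intro h; rw [h]
  simp only [h1]

theorem pv_alt_mixed1 (m n : Nat) : bit_sum_alt (Int.ofNat m) (Int.negSucc n) = false := by
  unfold bit_sum_alt
  have hc : ¬ ((0 : Int) ≤ Int.ofNat m ∧ (0 : Int) ≤ Int.negSucc n) := by
    simp only [Int.ofNat_eq_natCast, Int.negSucc_eq]; omega
  have hc2 : ¬ (Int.ofNat m < 0 ∧ Int.negSucc n < 0) := by
    simp only [Int.ofNat_eq_natCast, Int.negSucc_eq]; omega
  rw [if_neg hc, if_neg hc2]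

theorem pv_alt_mixed2 (m n : Nat) : bit_sum_alt (Int.negSucc m) (Int.ofNat n) = false := by
  unfold bit_sum_alt
  have hc : ¬ ((0 : Int) ≤ Int.negSucc m ∧ (0 : Int) ≤ Int.ofNat n) := by
    simp only [Int.ofNat_eq_natCast, Int.negSucc_eq]; omega
  have hc2 : ¬ (Int.negSucc m < 0 ∧ Int.ofNat n < 0) := by
    simp only [Int.ofNat_eq_natCast, Int.negSucc_eq]; omega
  rw [if_neg hc, if_neg hc2]

-- ===== VERDICT (by name: the statement is the Claim_ definition above) =====
theorem bit_sum_spec : Claim_equal_bit_sum := by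
  intro a s _
  unfold Spec_bit_sum
  cases a with
  | ofNat m =>
    cases s with
    | ofNat n => rw [pv_bit_sum_nonneg (m + n) m n le_rfl, pv_alt_nonneg]
    | negSucc n => rw [pv_bit_sum_mixed1, pv_alt_mixed1]
  | negSucc m =>
    cases s with
    | ofNat n => rw [pv_bit_sum_mixed2, pv_alt_mixed2]
    | negSucc n => rw [pv_bit_sum_negneg m n, pv_alt_negneg]
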